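-- pv_equiv track=rewrite | github.com/marota/Expert_op4grid_recommender | expert_op4grid_recommender/utils/helpers.py | add_prioritized_actions
-- ===== SOURCE A (Python) =====
-- from typing import Dict, Any, List, Tuple, Optional, Callable
--
-- def add_prioritized_actions(prioritized_actions: Dict[str, Any],
--                             identified_actions: Dict[str, Any],
--                             n_action_max_total: int = 5,
--                             n_action_max_per_type: int = 3) -> Dict[str, Any]:
--     """
--     Adds actions from a source dictionary to a target dictionary, respecting limits.
--
--     This function iterates through `identified_actions` and adds them to the
--     `prioritized_actions` dictionary until either the total number of actions in
--     `prioritized_actions` reaches `n_action_max_total` or the number of actions added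
--     *from this specific call* reaches `n_action_max_per_type`.
--
--     Args:
--         prioritized_actions (Dict[str, Any]): The dictionary to add actions to (modified in place).
--         identified_actions (Dict[str, Any]): The dictionary containing actions to potentially add.
--         n_action_max_total (int, optional): The overall maximum number of actions allowed
--             in `prioritized_actions`. Defaults to 5.
--         n_action_max_per_type (int, optional): The maximum number of actions to add from
--             `identified_actions` in this call. Defaults to 3.
--
--     Returns:
--         Dict[str, Any]: The updated `prioritized_actions` dictionary.
--     """
--     n_added_this_type = 0
--     # Iterate through the actions identified for this type/category
--     for action_id, action in identified_actions.items():
--         if action_id in prioritized_actions: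
--             continue # Skip actions already added in a previous batch
--         # Stop if total limit or per-type limit for this batch is reached
--         if len(prioritized_actions) >= n_action_max_total or n_added_this_type >= n_action_max_per_type:
--             break
--         # Add the action if limits not reached
--         prioritized_actions[action_id] = action
--         n_added_this_type += 1
--     return prioritized_actions
-- ===== SOURCE B (Python) =====
-- def add_prioritized_actions(prioritized_actions, identified_actions,
--                             n_action_max_total=5, n_action_max_per_type=3):
--     cap = max(0, min(n_action_max_total - len(prioritized_actions), n_action_max_per_type))
--     candidates = [(k, v) for k, v in identified_actions.items() if k not in prioritized_actions]
--     prioritized_actions.update(candidates[:cap])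
--     return prioritized_actions
-- ===== Notes on version B (the rewrite author's own statement) =====
-- stated objective: simpler
-- what changed: B computes the insertion budget once as max(0, min(total - len, per_type)), filters the not-yet-present candidates in a single comprehension and bulk-inserts a slice with one update(), replacing A's interleaved per-item limit checks, counter and break.
import Mathlib
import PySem

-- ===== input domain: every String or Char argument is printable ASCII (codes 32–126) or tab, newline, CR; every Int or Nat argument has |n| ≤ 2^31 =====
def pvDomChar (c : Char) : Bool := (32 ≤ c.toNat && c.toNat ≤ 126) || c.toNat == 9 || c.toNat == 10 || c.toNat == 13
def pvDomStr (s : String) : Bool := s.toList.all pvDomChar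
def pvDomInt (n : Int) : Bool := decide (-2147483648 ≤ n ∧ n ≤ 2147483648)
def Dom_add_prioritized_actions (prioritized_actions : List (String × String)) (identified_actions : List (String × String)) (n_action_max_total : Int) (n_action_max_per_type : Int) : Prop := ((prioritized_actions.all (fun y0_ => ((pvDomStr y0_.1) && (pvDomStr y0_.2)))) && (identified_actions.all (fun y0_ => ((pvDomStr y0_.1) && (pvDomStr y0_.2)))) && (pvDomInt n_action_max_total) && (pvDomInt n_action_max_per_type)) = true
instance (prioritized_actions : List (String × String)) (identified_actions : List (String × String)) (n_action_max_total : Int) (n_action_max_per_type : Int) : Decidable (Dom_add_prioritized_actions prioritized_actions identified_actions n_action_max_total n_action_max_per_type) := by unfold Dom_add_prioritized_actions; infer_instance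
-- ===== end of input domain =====

-- B replaces A's interleaved per-item limit checks by computing the insertion budget once,
-- filtering the fresh candidates in one pass and bulk-appending a slice (objective: simpler).
-- Both A and B mutate `prioritized_actions` in place identically; the equivalence is about the
-- returned value (which is that same dict).

-- ===== PORT A =====
-- the for-loop of A: state = current dict (assoc list) and the per-call counter n_added_this_type
def pvA_go (n_action_max_total n_action_max_per_type : Int) :
    List (String × String) → List (String × String) → Int → List (String × String)
  | p, [], _ => p
  | p, (k, v) :: rest, n =>
    if p.any (fun q => q.1 == k) then
      pvA_go n_action_max_total n_action_max_per_type p rest n          -- continue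
    else if n_action_max_total ≤ (p.length : Int) ∨ n_action_max_per_type ≤ n then
      p                                                                 -- break
    else
      pvA_go n_action_max_total n_action_max_per_type (p ++ [(k, v)]) rest (n + 1)

def add_prioritized_actions (prioritized_actions : List (String × String)) (identified_actions : List (String × String)) (n_action_max_total : Int) (n_action_max_per_type : Int) : List (String × String) :=
  pvA_go n_action_max_total n_action_max_per_type prioritized_actions identified_actions 0

-- ===== PORT B =====
def add_prioritized_actions_alt (prioritized_actions : List (String × String)) (identified_actions : List (String × String)) (n_action_max_total : Int) (n_action_max_per_type : Int) : List (String × String) :=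
  let cap : Int := max 0 (min (n_action_max_total - (prioritized_actions.length : Int)) n_action_max_per_type)
  let candidates := identified_actions.filter (fun kv => !(prioritized_actions.any (fun q => q.1 == kv.1)))
  prioritized_actions ++ candidates.take cap.toNat

-- ===== PRECONDITION & SPEC =====
-- Pre_ excludes identified_actions association lists with duplicate keys: such a list does not
-- represent a Python dict (the dict collapses duplicates before either program runs), and on the
-- raw list A's insert-then-skip behaviour vs B's one-shot filter is an artefact of the encoding.
def Pre_add_prioritized_actions (prioritized_actions : List (String × String)) (identified_actions : List (String × String)) (n_action_max_total : Int) (n_action_max_per_type : Int) : Prop :=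
  (identified_actions.map Prod.fst).Nodup
instance (prioritized_actions : List (String × String)) (identified_actions : List (String × String)) (n_action_max_total : Int) (n_action_max_per_type : Int) : Decidable (Pre_add_prioritized_actions prioritized_actions identified_actions n_action_max_total n_action_max_per_type) := by unfold Pre_add_prioritized_actions; infer_instance

def pvWitness_add_prioritized_actions : (List (String × String)) × (List (String × String)) × Int × Int :=
  ([("a", "1")], [("b", "2"), ("c", "3")], 5, 3)

def Spec_add_prioritized_actions (prioritized_actions : List (String × String)) (identified_actions : List (String × String)) (n_action_max_total : Int) (n_action_max_per_type : Int) (out : List (String × String)) : Prop := out = add_prioritized_actions_alt prioritized_actions identified_actions n_action_max_total n_action_max_per_type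
instance (prioritized_actions : List (String × String)) (identified_actions : List (String × String)) (n_action_max_total : Int) (n_action_max_per_type : Int) (out : List (String × String)) : Decidable (Spec_add_prioritized_actions prioritized_actions identified_actions n_action_max_total n_action_max_per_type out) := by unfold Spec_add_prioritized_actions; infer_instance

-- ===== CLAIM (what is proved, stated in full; the proofs are below) =====
def Claim_equal_add_prioritized_actions : Prop := ∀ (prioritized_actions : List (String × String)) (identified_actions : List (String × String)) (n_action_max_total : Int) (n_action_max_per_type : Int), Dom_add_prioritized_actions prioritized_actions identified_actions n_action_max_total n_action_max_per_type → Pre_add_prioritized_actions prioritized_actions identified_actions n_action_max_total n_action_max_per_type → Spec_add_prioritized_actions prioritized_actions identified_actions n_action_max_total n_action_max_per_type (add_prioritized_actions prioritized_actions identified_actions n_action_max_total n_action_max_per_type)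

-- ===== LEMMAS AND PROOFS =====

-- A's loop, started from dict p with counter n, appends exactly the first
-- max(0, min(total - |p|, per - n)) fresh candidates.
theorem pvA_go_eq (t per : Int) (items : List (String × String))
    (hnd : (items.map Prod.fst).Nodup) :
    ∀ (p : List (String × String)) (n : Int),
      pvA_go t per p items n =
        p ++ (items.filter (fun kv => !(p.any (fun q => q.1 == kv.1)))).take
              (max 0 (min (t - (p.length : Int)) (per - n))).toNat := by
  induction items with
  | nil => intro p n; simp [pvA_go]
  | cons hd rest ih =>
    obtain ⟨k, v⟩ := hd
    simp only [List.map_cons, List.nodup_cons, List.mem_map] at hnd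
    obtain ⟨hk, hrest⟩ := hnd
    intro p n
    by_cases hmem : p.any (fun q => q.1 == k) = true
    · rw [show pvA_go t per p ((k, v) :: rest) n = pvA_go t per p rest n from by
        simp [pvA_go, hmem]]
      rw [ih hrest p n]
      simp [hmem]
    · by_cases hlim : t ≤ (p.length : Int) ∨ per ≤ n
      · rw [show pvA_go t per p ((k, v) :: rest) n = p from by
          simp [pvA_go, hmem, hlim]]
        have : (max 0 (min (t - (p.length : Int)) (per - n))).toNat = 0 := by omega
        simp [this]
      · rw [show pvA_go t per p ((k, v) :: rest) n
              = pvA_go t per (p ++ [(k, v)]) rest (n + 1) from by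
          simp only [pvA_go, hmem, Bool.false_eq_true, if_false, hlim, if_false]]
        rw [ih hrest (p ++ [(k, v)]) (n + 1)]
        -- the fresh head is the next candidate; the rest filters identically
        have hfil : rest.filter (fun kv => !((p ++ [(k, v)]).any (fun q => q.1 == kv.1)))
            = rest.filter (fun kv => !(p.any (fun q => q.1 == kv.1))) := by
          apply List.filter_congr
          intro kv hkv
          have hne : kv.1 ≠ k := by
            intro h
            exact hk ⟨kv, hkv, h⟩
          have hb : (k == kv.1) = false := by
            simp [Ne.symm hne]
          simp [List.any_append, hb]
        have hcap : (max 0 (min (t - ((p ++ [(k, v)]).length : Int)) (per - (n + 1)))).toNat + 1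
            = (max 0 (min (t - (p.length : Int)) (per - n))).toNat := by
          simp only [List.length_append, List.length_cons, List.length_nil]
          push_cast
          omega
        rw [hfil, ← hcap]
        simp [hmem, List.take_succ_cons]
  
-- ===== VERDICT (by name: the statement is the Claim_ definition above) =====
theorem add_prioritized_actions_spec : Claim_equal_add_prioritized_actions := by
  intro p i t per _hDom hPre
  unfold Spec_add_prioritized_actions add_prioritized_actions add_prioritized_actions_alt
  rw [pvA_go_eq t per i hPre p 0]
  simp
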